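-- pv_equiv track=rewrite | github.com/n-and-n3/KyoproLibrary | QuotientRange.py | quotient_range_generator
-- ===== SOURCE A (Python) =====
-- import math
--
-- def quotient_range_generator(N):
--     sqrtN = math.isqrt(N)
--     m = N
--     for i in range(1,sqrtN+1):
--         yield (i,i+1,N//i)
--         m = N//i
--     for i in range(m-1,0,-1):
--         L = N//(i+1)+1
--         R = N//i+1
--         if L < R:
--           yield (L,R,i)
-- ===== SOURCE B (Python) =====
-- def quotient_range_generator(N):
--     i = 1
--     while i <= N:
--         q = N // i
--         nxt = N // q
--         yield (i, nxt + 1, q)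
--         i = nxt + 1
-- ===== Notes on version B (the rewrite author's own statement) =====
-- stated objective: simpler
-- what changed: Replaces A's two separate passes (ascending width-1 blocks for i=1..isqrt(N), then a descending scan over quotient values with an emptiness test) by one forward while-loop that jumps i -> N//(N//i)+1, yielding each quotient block directly.
import Mathlib
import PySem

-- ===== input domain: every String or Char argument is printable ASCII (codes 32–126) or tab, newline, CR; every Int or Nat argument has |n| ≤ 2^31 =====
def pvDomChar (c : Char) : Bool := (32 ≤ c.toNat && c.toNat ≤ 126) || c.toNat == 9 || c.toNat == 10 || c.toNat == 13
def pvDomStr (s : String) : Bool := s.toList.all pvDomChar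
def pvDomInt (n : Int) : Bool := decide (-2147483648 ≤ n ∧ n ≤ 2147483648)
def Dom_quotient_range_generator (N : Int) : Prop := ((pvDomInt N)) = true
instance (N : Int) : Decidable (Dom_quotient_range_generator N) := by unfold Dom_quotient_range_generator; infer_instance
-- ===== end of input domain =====

-- B replaces A's two passes (width-1 blocks up to isqrt(N), then a descending scan over
-- quotient values) by one forward while-loop jumping i -> N//(N//i)+1: simpler decomposition.
-- Both are ported as the list of yielded triples, in yield order.

-- ===== PORT A =====
-- math.isqrt(N) = Int.sqrt N for 0 ≤ N; for N < 0 isqrt raises ValueError (excluded by Pre_).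
def quotient_range_generator (N : Int) : List (Int × Int × Int) :=
  let sqrtN := Int.sqrt N
  -- first for-loop: yields (i, i+1, N//i) and updates m
  let st := (PySem.List.pyRange 1 (sqrtN + 1) 1).foldl
      (fun (st : List (Int × Int × Int) × Int) i =>
        (st.1 ++ [(i, i + 1, PySem.Int.floordiv N i)], PySem.Int.floordiv N i))
      ([], N)
  -- second for-loop: descending over quotient values
  (PySem.List.pyRange (st.2 - 1) 0 (-1)).foldl
      (fun acc i =>
        let L := PySem.Int.floordiv N (i + 1) + 1
        let R := PySem.Int.floordiv N i + 1
        if L < R then acc ++ [(L, R, i)] else acc)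
      st.1

-- ===== PORT B =====
-- termination helper for the while-loop: i strictly increases
lemma qrgStep {N i : Int} (h1 : 1 ≤ i) (h2 : i ≤ N) :
    1 ≤ PySem.Int.floordiv N i ∧ i ≤ PySem.Int.floordiv N (PySem.Int.floordiv N i) := by
  have hi : 0 < i := h1
  have hq : 1 ≤ PySem.Int.floordiv N i := by
    rw [PySem.Int.le_floordiv_iff_mul_le hi]; nlinarith
  refine ⟨hq, ?_⟩
  rw [PySem.Int.le_floordiv_iff_mul_le hq]
  have hm := PySem.Int.floordiv_mul_add_mod N i
  have hm0 := PySem.Int.mod_nonneg N hi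
  nlinarith

-- while i <= N: q = N // i; nxt = N // q; yield (i, nxt+1, q); i = nxt+1
-- (the conjunct 1 ≤ i in the guard is a totality guard only: the loop starts at i = 1
--  and i only increases, so it never changes the computed value)
def qrgGo (N i : Int) : List (Int × Int × Int) :=
  if h : 1 ≤ i ∧ i ≤ N then
    let q := PySem.Int.floordiv N i
    let nxt := PySem.Int.floordiv N q
    (i, nxt + 1, q) :: qrgGo N (nxt + 1)
  else []
termination_by (N + 1 - i).toNat
decreasing_by
  have := qrgStep h.1 h.2
  omega

def quotient_range_generator_alt (N : Int) : List (Int × Int × Int) := qrgGo N 1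

-- ===== PRECONDITION & SPEC =====
-- math.isqrt raises ValueError for negative N, so A returns only for 0 ≤ N.
def Pre_quotient_range_generator (N : Int) : Prop := 0 ≤ N
instance (N : Int) : Decidable (Pre_quotient_range_generator N) := by unfold Pre_quotient_range_generator; infer_instance
def pvWitness_quotient_range_generator : Int := 10

def Spec_quotient_range_generator (N : Int) (out : List (Int × Int × Int)) : Prop := out = quotient_range_generator_alt N
instance (N : Int) (out : List (Int × Int × Int)) : Decidable (Spec_quotient_range_generator N out) := by unfold Spec_quotient_range_generator; infer_instance

-- ===== CLAIM (what is proved, stated in full; the proofs are below) =====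
def Claim_equal_quotient_range_generator : Prop := ∀ (N : Int), Dom_quotient_range_generator N → Pre_quotient_range_generator N → Spec_quotient_range_generator N (quotient_range_generator N)
-- ===== LEMMAS AND PROOFS =====

-- key floor identity: for 1 ≤ i with i*i ≤ N, N // (N // i) = i
lemma qrg_key {N i : Int} (h1 : 1 ≤ i) (hii : i * i ≤ N) :
    PySem.Int.floordiv N (PySem.Int.floordiv N i) = i := by
  have hi : 0 < i := h1
  have hq : i ≤ PySem.Int.floordiv N i := by
    rw [PySem.Int.le_floordiv_iff_mul_le hi]; exact hii
  have hqpos : 0 < PySem.Int.floordiv N i := lt_of_lt_of_le hi hq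
  have hm := PySem.Int.floordiv_mul_add_mod N i
  have hm0 := PySem.Int.mod_nonneg N hi
  have hmlt := PySem.Int.mod_lt N hi
  have hle : i ≤ PySem.Int.floordiv N (PySem.Int.floordiv N i) := by
    rw [PySem.Int.le_floordiv_iff_mul_le hqpos]; nlinarith
  have hlt : PySem.Int.floordiv N (PySem.Int.floordiv N i) < i + 1 := by
    rw [PySem.Int.floordiv_lt_iff_lt_mul hqpos]; nlinarith
  omega

-- floor-division bracket, in linear form
lemma fd_bounds {N b : Int} (hb : 0 < b) :
    PySem.Int.floordiv N b * b ≤ N ∧ N < PySem.Int.floordiv N b * b + b := by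
  have h1 := PySem.Int.floordiv_mul_add_mod N b
  have h2 := PySem.Int.mod_nonneg N hb
  have h3 := PySem.Int.mod_lt N hb
  constructor <;> linarith

-- the descending second loop of A, as filter+map over a countdown range
lemma qrg_second (N : Int) (hN : 1 ≤ N) : ∀ k : Nat,
    qrgGo N (PySem.Int.floordiv N ((k : Int) + 1) + 1) =
      ((PySem.List.pyRange (k : Int) 0 (-1)).filter
          (fun i => PySem.Int.floordiv N (i + 1) + 1 < PySem.Int.floordiv N i + 1)).map
        (fun i => (PySem.Int.floordiv N (i + 1) + 1, PySem.Int.floordiv N i + 1, i)) := by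
  intro k
  induction k with
  | zero =>
    simp only [Nat.cast_zero, zero_add]
    rw [PySem.List.pyRange_neg_one_eq_nil le_rfl]
    unfold qrgGo
    simp
  | succ k ih =>
    simp only [Nat.cast_add, Nat.cast_one]
    rw [show (k:Int) + 1 + 1 = (k:Int) + 2 from by ring]
    have hk2 : (0:Int) < (k:Int) + 2 := by positivity
    have hk1 : (0:Int) < (k:Int) + 1 := by positivity
    have hb2 := fd_bounds (N := N) hk2
    have hb1 := fd_bounds (N := N) hk1
    have hpos2 : 0 ≤ PySem.Int.floordiv N ((k:Int) + 2) := by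
      rw [PySem.Int.le_floordiv_iff_mul_le hk2]; nlinarith
    have hpos1 : 0 ≤ PySem.Int.floordiv N ((k:Int) + 1) := by
      rw [PySem.Int.le_floordiv_iff_mul_le hk1]; nlinarith
    have hmono : PySem.Int.floordiv N ((k:Int) + 2) ≤ PySem.Int.floordiv N ((k:Int) + 1) := by
      rw [PySem.Int.le_floordiv_iff_mul_le hk1]; nlinarith
    have hfle : PySem.Int.floordiv N ((k:Int) + 1) ≤ N := by nlinarith
    rw [PySem.List.pyRange_neg_one_cons (by positivity : (0:Int) < (k:Int) + 1),
        show (k:Int) + 1 - 1 = (k:Int) from by ring]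
    rcases lt_or_ge (PySem.Int.floordiv N ((k:Int) + 2)) (PySem.Int.floordiv N ((k:Int) + 1)) with hne | hge
    · -- nonempty block for quotient k+1
      set j := PySem.Int.floordiv N ((k:Int) + 2) + 1 with hj
      have hguard : 1 ≤ j ∧ j ≤ N := by omega
      have hq : PySem.Int.floordiv N j = (k:Int) + 1 := by
        have hjpos : (0:Int) < j := by omega
        have hlow : (k:Int) + 1 ≤ PySem.Int.floordiv N j := by
          rw [PySem.Int.le_floordiv_iff_mul_le hjpos]; nlinarith
        have hhigh : PySem.Int.floordiv N j < (k:Int) + 2 := by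
          rw [PySem.Int.floordiv_lt_iff_lt_mul hjpos]; nlinarith
        omega
      conv_lhs => rw [qrgGo]
      rw [dif_pos hguard]
      rw [List.filter_cons, if_pos (by simp only [decide_eq_true_eq, show (k:Int) + 1 + 1 = (k:Int) + 2 from by ring]; omega), List.map_cons]
      simp only [hq]
      exact congrArg _ ih
    · -- empty block: same position, A's emptiness test is false
      have heq' : PySem.Int.floordiv N ((k:Int) + 2) = PySem.Int.floordiv N ((k:Int) + 1) :=
        le_antisymm hmono hge
      rw [List.filter_cons, if_neg (by simp only [decide_eq_true_eq, show (k:Int) + 1 + 1 = (k:Int) + 2 from by ring]; omega), heq']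
      exact ih

-- B's loop walks the width-1 prefix one index at a time (fuel form: i = s + 1 - n)
lemma qrg_first (N : Int) (s : Int) (hss : s * s ≤ N) :
    ∀ n : Nat, ∀ i : Int, i = s + 1 - (n : Int) → 1 ≤ i →
      qrgGo N i = (PySem.List.pyRange i (s + 1) 1).map
          (fun j => (j, j + 1, PySem.Int.floordiv N j)) ++ qrgGo N (s + 1) := by
  intro n
  induction n with
  | zero =>
    intro i hi _
    have : i = s + 1 := by omega
    subst this
    rw [PySem.List.pyRange_one_eq_nil le_rfl]
    simp
  | succ n ih =>
    intro i hi h1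
    have his : i ≤ s := by omega
    have hii : i * i ≤ N := by nlinarith
    have hiN : i ≤ N := by nlinarith
    have hkey := qrg_key h1 hii
    conv_lhs => rw [qrgGo]
    rw [dif_pos ⟨h1, hiN⟩]
    dsimp only
    rw [PySem.List.pyRange_one_cons (by omega : i < s + 1), List.map_cons, List.cons_append]
    rw [hkey]
    exact congrArg _ (ih (i + 1) (by omega) (by omega))

-- characterisation of the pair-state fold of A's first loop
lemma qrg_foldA (N : Int) (l : List Int) (acc : List (Int × Int × Int)) (m0 : Int) :
    l.foldl (fun (st : List (Int × Int × Int) × Int) i =>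
        (st.1 ++ [(i, i + 1, PySem.Int.floordiv N i)], PySem.Int.floordiv N i)) (acc, m0) =
      (acc ++ l.map (fun i => (i, i + 1, PySem.Int.floordiv N i)),
       l.foldl (fun _ i => PySem.Int.floordiv N i) m0) := by
  induction l generalizing acc m0 with
  | nil => simp
  | cons a t ih => simp [List.foldl_cons, ih]

-- A's second loop as filter+map
lemma qrg_foldB (N : Int) (l : List Int) (acc : List (Int × Int × Int)) :
    l.foldl (fun acc i =>
        let L := PySem.Int.floordiv N (i + 1) + 1
        let R := PySem.Int.floordiv N i + 1
        if L < R then acc ++ [(L, R, i)] else acc) acc =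
      acc ++ (l.filter (fun i => PySem.Int.floordiv N (i + 1) + 1 < PySem.Int.floordiv N i + 1)).map
        (fun i => (PySem.Int.floordiv N (i + 1) + 1, PySem.Int.floordiv N i + 1, i)) := by
  induction l generalizing acc with
  | nil => simp
  | cons a t ih =>
    simp only [List.foldl_cons, List.filter_cons]
    by_cases h : PySem.Int.floordiv N (a + 1) + 1 < PySem.Int.floordiv N a + 1
    · rw [if_pos h, ih, if_pos (by simpa using h)]
      simp
    · rw [if_neg h, ih, if_neg (by simpa using h)]

-- the last value of A's m-updating loop is N // sqrtN
lemma qrg_lastm (N s : Int) (hs : 1 ≤ s) :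
    (PySem.List.pyRange 1 (s + 1) 1).foldl (fun _ i => PySem.Int.floordiv N i) N
      = PySem.Int.floordiv N s := by
  rw [PySem.List.pyRange_one_append 1 s (s + 1) (by omega) (by omega)]
  rw [List.foldl_append]
  rw [PySem.List.pyRange_one_singleton]
  rfl

-- ===== VERDICT (by name: the statement is the Claim_ definition above) =====
theorem quotient_range_generator_spec : Claim_equal_quotient_range_generator := by
  intro N _ hPre
  unfold Spec_quotient_range_generator
  unfold Pre_quotient_range_generator at hPre
  rcases eq_or_lt_of_le hPre with h0 | hN1
  · -- N = 0: both yield nothing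
    have h0' : N = 0 := h0.symm
    subst h0'
    have hB : quotient_range_generator_alt 0 = [] := by
      unfold quotient_range_generator_alt qrgGo
      norm_num
    rw [hB]
    decide
  · -- N ≥ 1
    have hN : 1 ≤ N := hN1
    -- facts about s = isqrt N
    set s : Int := Int.sqrt N with hsdef
    have hs0 : 0 ≤ s := Int.sqrt_nonneg N
    have hss : s * s ≤ N := by
      have h1 : Nat.sqrt N.toNat * Nat.sqrt N.toNat ≤ N.toNat := by
        have := Nat.sqrt_le' N.toNat
        rw [pow_two] at this
        exact this
      have h2 : s = ((Nat.sqrt N.toNat : Nat) : Int) := by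
        rw [hsdef]; rfl
      rw [h2]
      omega
    have hs1 : 1 ≤ s := by
      have h2 : s = ((Nat.sqrt N.toNat : Nat) : Int) := by rw [hsdef]; rfl
      have : 0 < Nat.sqrt N.toNat := Nat.sqrt_pos.mpr (by omega)
      omega
    set m : Int := PySem.Int.floordiv N s with hmdef
    have hspos : (0:Int) < s := hs1
    have hbs := fd_bounds (N := N) hspos
    have hm1 : 1 ≤ m := by
      rw [hmdef, PySem.Int.le_floordiv_iff_mul_le hspos]; nlinarith
    have hfm : PySem.Int.floordiv N m = s := qrg_key hs1 hss
    -- A's value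
    have hA : quotient_range_generator N =
        (PySem.List.pyRange 1 (s + 1) 1).map (fun i => (i, i + 1, PySem.Int.floordiv N i)) ++
          ((PySem.List.pyRange (m - 1) 0 (-1)).filter
              (fun i => PySem.Int.floordiv N (i + 1) + 1 < PySem.Int.floordiv N i + 1)).map
            (fun i => (PySem.Int.floordiv N (i + 1) + 1, PySem.Int.floordiv N i + 1, i)) := by
      unfold quotient_range_generator
      rw [← hsdef]
      dsimp only
      rw [qrg_foldA]
      rw [qrg_lastm N s hs1]
      rw [← hmdef]
      rw [qrg_foldB]
      simp
    -- B's value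
    have hB : quotient_range_generator_alt N =
        (PySem.List.pyRange 1 (s + 1) 1).map (fun i => (i, i + 1, PySem.Int.floordiv N i)) ++
          ((PySem.List.pyRange (m - 1) 0 (-1)).filter
              (fun i => PySem.Int.floordiv N (i + 1) + 1 < PySem.Int.floordiv N i + 1)).map
            (fun i => (PySem.Int.floordiv N (i + 1) + 1, PySem.Int.floordiv N i + 1, i)) := by
      unfold quotient_range_generator_alt
      rw [qrg_first N s hss s.toNat 1 (by omega) le_rfl]
      have hcast : (((m - 1).toNat : Nat) : Int) = m - 1 := by omega
      have h2 := qrg_second N hN (m - 1).toNat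
      rw [hcast] at h2
      rw [show m - 1 + 1 = m from by ring] at h2
      rw [hfm] at h2
      rw [h2]
    rw [hA, hB]
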